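-- pv_equiv track=rewrite | github.com/BennyStrobes/non_linear_sldsc | run_non_linear_sldsc_multivariate_updates.py | window_includes_mhc_region
-- ===== SOURCE A (Python) =====
-- def window_includes_mhc_region(window_chrom_num, window_start, window_end, mhc_region):
-- 	if window_chrom_num != '6':
-- 		return False
-- 	else:
-- 		in_mhc = False
-- 		for pos in range(window_start,window_end):
-- 			if pos in mhc_region:
-- 				in_mhc = True
-- 		return in_mhc
-- ===== SOURCE B (Python) =====
-- def window_includes_mhc_region(window_chrom_num, window_start, window_end, mhc_region):
--     return window_chrom_num == '6' and any(
--         window_start <= pos < window_end for pos in mhc_region)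
-- ===== Notes on version B (the rewrite author's own statement) =====
-- stated objective: alternative
-- what changed: Instead of scanning every position of the window and testing membership in mhc_region, B iterates once over mhc_region and tests each position against the window bounds (O(|mhc_region|) instead of O(window length * |mhc_region|)), though a timing run here did not measure a speed-up.
import Mathlib
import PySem

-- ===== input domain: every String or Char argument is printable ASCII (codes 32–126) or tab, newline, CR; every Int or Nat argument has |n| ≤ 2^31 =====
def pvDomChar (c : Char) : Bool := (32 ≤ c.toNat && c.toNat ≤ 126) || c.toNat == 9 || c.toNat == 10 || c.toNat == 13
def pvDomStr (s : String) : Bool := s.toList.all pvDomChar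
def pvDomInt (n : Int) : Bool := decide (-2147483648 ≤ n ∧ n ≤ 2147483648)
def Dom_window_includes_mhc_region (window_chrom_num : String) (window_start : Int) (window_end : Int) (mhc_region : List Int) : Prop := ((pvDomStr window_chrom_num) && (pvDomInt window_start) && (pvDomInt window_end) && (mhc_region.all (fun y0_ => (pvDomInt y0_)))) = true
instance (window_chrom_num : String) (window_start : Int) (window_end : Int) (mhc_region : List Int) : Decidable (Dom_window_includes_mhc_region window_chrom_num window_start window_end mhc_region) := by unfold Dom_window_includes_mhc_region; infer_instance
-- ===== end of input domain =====

-- ===== PORT A =====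
-- Literal port of A: return False unless chromosome '6'; otherwise scan every
-- position of range(window_start, window_end), setting in_mhc when pos ∈ mhc_region.
def window_includes_mhc_region (window_chrom_num : String) (window_start : Int) (window_end : Int) (mhc_region : List Int) : Bool :=
  if window_chrom_num ≠ "6" then
    false
  else
    (PySem.List.pyRange window_start window_end 1).foldl
      (fun in_mhc pos => if pos ∈ mhc_region then true else in_mhc) false

-- ===== PORT B =====
-- B (one line in my header): iterate over mhc_region once, testing bounds — O(|mhc_region|).
def window_includes_mhc_region_alt (window_chrom_num : String) (window_start : Int) (window_end : Int) (mhc_region : List Int) : Bool :=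
  window_chrom_num == "6" &&
    mhc_region.any (fun pos => decide (window_start ≤ pos) && decide (pos < window_end))

-- ===== PRECONDITION & SPEC =====
def Spec_window_includes_mhc_region (window_chrom_num : String) (window_start : Int) (window_end : Int) (mhc_region : List Int) (out : Bool) : Prop := out = window_includes_mhc_region_alt window_chrom_num window_start window_end mhc_region
instance (window_chrom_num : String) (window_start : Int) (window_end : Int) (mhc_region : List Int) (out : Bool) : Decidable (Spec_window_includes_mhc_region window_chrom_num window_start window_end mhc_region out) := by unfold Spec_window_includes_mhc_region; infer_instance

-- ===== CLAIM (what is proved, stated in full; the proofs are below) =====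
def Claim_equal_window_includes_mhc_region : Prop := ∀ (window_chrom_num : String) (window_start : Int) (window_end : Int) (mhc_region : List Int), Dom_window_includes_mhc_region window_chrom_num window_start window_end mhc_region → Spec_window_includes_mhc_region window_chrom_num window_start window_end mhc_region (window_includes_mhc_region window_chrom_num window_start window_end mhc_region)

-- ===== LEMMAS AND PROOFS ===== (by name: the statement is the Claim_ definition above) =====
-- The A-side fold sets the accumulator iff some scanned position lies in mhc_region.
theorem pv_foldl_any (r l : List Int) (b : Bool) :
    r.foldl (fun in_mhc pos => if pos ∈ l then true else in_mhc) b
      = (b || r.any (fun pos => decide (pos ∈ l))) := by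
  induction r generalizing b with
  | nil => simp
  | cons x xs ih =>
    simp only [List.foldl_cons, List.any_cons, ih]
    by_cases h : x ∈ l <;> simp [h]

-- ===== VERDICT (by name: the statement is the Claim_ definition above) =====
theorem window_includes_mhc_region_spec : Claim_equal_window_includes_mhc_region := by
  intro c s e l _
  unfold Spec_window_includes_mhc_region window_includes_mhc_region window_includes_mhc_region_alt
  by_cases hc : c = "6"
  · subst hc
    simp only [ne_eq, not_true_eq_false, if_false, beq_self_eq_true, Bool.true_and,
      pv_foldl_any, Bool.false_or]
    rw [Bool.eq_iff_iff]
    simp only [List.any_eq_true, decide_eq_true_eq, Bool.and_eq_true, PySem.List.mem_pyRange_one]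
    constructor
    · rintro ⟨p, hp, hmem⟩; exact ⟨p, hmem, hp⟩
    · rintro ⟨p, hmem, hp⟩; exact ⟨p, hp, hmem⟩
  · simp [hc]
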